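-- pv_equiv track=rewrite | github.com/dimetrius2000/-2 | 3zadanie.py | flip_number
-- ===== SOURCE A (Python) =====
-- def flip_number(a):
--     if len(a) == 1:
--         return a
--
--     else:
--         n = str(int(a) % 10)
--         a = str(int(a) // 10)
--         if n == '0':
--             return n +flip_number(a)
--         else:
--             return flip_number(n) + a
-- ===== SOURCE B (Python) =====
-- def flip_number(a):
--     if len(a) == 1:
--         return a
--     zeros = 0
--     while True:
--         q, r = divmod(int(a), 10)
--         a = str(q)
--         if r != 0:
--             return '0' * zeros + str(r) + a
--         zeros += 1
--         if len(a) == 1: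
--             return '0' * zeros + a
-- ===== Notes on version B (the rewrite author's own statement) =====
-- stated objective: simpler
-- what changed: Replaces A's recursion (with a recursive re-entry for each peeled digit) by one flat while-loop that peels with a single divmod per step, counts the peeled zeros in an integer and emits them once as '0'*zeros, returning directly when the last digit is nonzero or the quotient string has length 1.
import Mathlib
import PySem

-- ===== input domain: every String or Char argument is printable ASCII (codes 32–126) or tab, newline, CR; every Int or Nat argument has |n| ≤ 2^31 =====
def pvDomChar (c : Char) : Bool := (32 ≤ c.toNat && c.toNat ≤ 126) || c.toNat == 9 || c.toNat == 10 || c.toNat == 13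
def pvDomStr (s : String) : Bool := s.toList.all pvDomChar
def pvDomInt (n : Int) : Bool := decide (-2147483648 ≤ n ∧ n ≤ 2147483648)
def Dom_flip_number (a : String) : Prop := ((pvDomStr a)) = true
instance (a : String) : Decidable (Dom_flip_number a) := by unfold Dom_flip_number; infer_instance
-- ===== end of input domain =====

-- B replaces A's recursion by one flat while-loop: a single divmod per step, the peeled
-- zeros counted in an integer and emitted once as '0' * zeros (objective: simpler).


-- ===== PORT A =====
-- Fuel only makes A's recursion total (len a + 2 always suffices); the int(a) that
-- raises ValueError in Python is `none` here and is excluded by Pre_ below.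
def pvFlipA (f : Nat) (a : String) : String :=
  if PySem.Str.len a = 1 then a
    else
      match f, PySem.Int.ofStr? a with
      | _, none => ""
      | 0, _ => ""
      | f + 1, some v =>
        let n := PySem.Int.toStr (PySem.Int.mod v 10)
        let a' := PySem.Int.toStr (PySem.Int.floordiv v 10)
        if n = "0" then n ++ pvFlipA f a'
        else pvFlipA f n ++ a'

def flip_number (a : String) : String := pvFlipA (a.toList.length + 2) a

-- ===== PORT B =====
-- Python's '0' * zeros (zeros a nonnegative count) is exactly this replicate.
def pvZeros (zeros : Nat) : String := String.ofList (List.replicate zeros '0')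

-- Source B's while-True loop, one fuel per iteration; on fuel exhaustion or a failed
-- int(a) (ValueError, excluded by Pre_) it returns the zeros accumulated so far.
def pvFlipB (f : Nat) (zeros : Nat) (a : String) : String :=
  match f with
  | 0 => pvZeros zeros
  | f + 1 =>
    match PySem.Int.ofStr? a with
    | none => pvZeros zeros
    | some v =>
      match PySem.Int.divmod? v 10 with
      | none => pvZeros zeros
      | some (q, r) =>
        let a' := PySem.Int.toStr q
        if r ≠ 0 then pvZeros zeros ++ PySem.Int.toStr r ++ a'
        else if PySem.Str.len a' = 1 then pvZeros (zeros + 1) ++ a'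
        else pvFlipB f (zeros + 1) a'

def flip_number_alt (a : String) : String :=
  if PySem.Str.len a = 1 then a
  else pvFlipB (a.toList.length + 2) 0 a

-- ===== PRECONDITION & SPEC =====
-- Pre_ excludes exactly the inputs where Python's int(a) raises ValueError (len(a) != 1
-- and a is not an int literal).
def Pre_flip_number (a : String) : Prop :=
  PySem.Str.len a = 1 ∨ (PySem.Int.ofStr? a).isSome = true
instance (a : String) : Decidable (Pre_flip_number a) := by unfold Pre_flip_number; infer_instance
def pvWitness_flip_number : String := "120"

def Spec_flip_number (a : String) (out : String) : Prop := out = flip_number_alt a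
instance (a : String) (out : String) : Decidable (Spec_flip_number a out) := by unfold Spec_flip_number; infer_instance

-- ===== CLAIM (what is proved, stated in full; the proofs are below) =====
def Claim_equal_flip_number : Prop := ∀ (a : String), Dom_flip_number a → Pre_flip_number a → Spec_flip_number a (flip_number a)

-- ===== LEMMAS AND PROOFS =====

-- A single digit 0..9 printed by str() is a length-1 string, so A's inner recursive
-- call flip_number(n) is a base case.
theorem pvFlipA_digit (f : Nat) (d : Int) (h0 : 0 ≤ d) (h1 : d < 10) :
    pvFlipA f (PySem.Int.toStr d) = PySem.Int.toStr d := by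
  have h : PySem.Str.len (PySem.Int.toStr d) = 1 := by
    interval_cases d <;> decide
  rw [pvFlipA.eq_def, if_pos h]

theorem pvZeros_succ (z : Nat) : pvZeros (z + 1) = pvZeros z ++ "0" := by
  unfold pvZeros
  rw [List.replicate_succ', String.ofList_append]

-- str(d) = "0" only for the digit 0 (d ranges over values of v % 10).
theorem toStr_digit_eq_zero (d : Int) (h0 : 0 ≤ d) (h1 : d < 10) :
    PySem.Int.toStr d = "0" ↔ d = 0 := by
  interval_cases d <;> decide

-- divmod(v, 10) always succeeds and is (v // 10, v % 10).
theorem divmod_ten (v : Int) : PySem.Int.divmod? v 10 =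
    some (PySem.Int.floordiv v 10, PySem.Int.mod v 10) := by
  simp [PySem.Int.divmod?, PySem.Int.floordiv, PySem.Int.mod]

-- Loop invariant: B's iteration with zero-count z equals '0'*z ++ (A's recursion),
-- on any non-length-1 string (the only ones the loop is entered on).
theorem pvFlipB_eq (f : Nat) : ∀ (z : Nat) (a : String),
    ¬ PySem.Str.len a = 1 → pvFlipB f z a = pvZeros z ++ pvFlipA f a := by
  induction f with
  | zero =>
    intro z a h
    rw [pvFlipB.eq_def, pvFlipA.eq_def, if_neg h]
    cases PySem.Int.ofStr? a <;> simp
  | succ f ih =>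
    intro z a h
    cases hv : PySem.Int.ofStr? a with
    | none =>
      rw [pvFlipB.eq_def, pvFlipA.eq_def, if_neg h]
      simp [hv]
    | some v =>
      have hm0 : (0:Int) ≤ PySem.Int.mod v 10 := PySem.Int.mod_nonneg v (by norm_num)
      have hm1 : PySem.Int.mod v 10 < 10 := PySem.Int.mod_lt v (by norm_num)
      rw [pvFlipB.eq_def, pvFlipA.eq_def, if_neg h]
      simp only [hv, divmod_ten]
      by_cases hr : PySem.Int.mod v 10 = 0
      · -- last digit is 0: A prepends "0", B counts it
        have hn : PySem.Int.toStr (PySem.Int.mod v 10) = "0" :=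
          (toStr_digit_eq_zero _ hm0 hm1).mpr hr
        rw [if_neg (not_not_intro hr), if_pos hn, hn]
        by_cases hl : PySem.Str.len (PySem.Int.toStr (PySem.Int.floordiv v 10)) = 1
        · -- quotient string has length 1: both stop
          rw [if_pos hl,
              show pvFlipA f (PySem.Int.toStr (PySem.Int.floordiv v 10)) =
                  PySem.Int.toStr (PySem.Int.floordiv v 10) from by
                rw [pvFlipA.eq_def, if_pos hl],
              pvZeros_succ]
          simp [String.append_assoc]
        · rw [if_neg hl, ih (z + 1) _ hl, pvZeros_succ]
          simp [String.append_assoc]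
      · -- nonzero last digit: both return at once
        have hn : ¬ PySem.Int.toStr (PySem.Int.mod v 10) = "0" := fun hx =>
          hr ((toStr_digit_eq_zero _ hm0 hm1).mp hx)
        rw [if_pos hr, if_neg hn,
            pvFlipA_digit f (PySem.Int.mod v 10) hm0 hm1]
        simp [String.append_assoc]

-- ===== VERDICT (by name: the statement is the Claim_ definition above) =====
theorem flip_number_spec : Claim_equal_flip_number := by
  intro a _ _
  unfold Spec_flip_number flip_number flip_number_alt
  by_cases h : PySem.Str.len a = 1
  · rw [if_pos h, pvFlipA.eq_def, if_pos h]
  · rw [if_neg h, pvFlipB_eq _ _ _ h]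
    simp [pvZeros]
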